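-- pv_equiv track=rewrite | github.com/Masafuro/Yahml | subpython/subset_fonts.py | build_family_codepoints
-- ===== SOURCE A (Python) =====
-- def build_family_codepoints(class_to_family, class_texts):
--     family_texts = {}
--     for cls, text in class_texts.items():
--         family = class_to_family.get(cls)
--         if not family:
--             continue
--         family_texts.setdefault(family, []).append(text)
--     family_codepoints = {}
--     for family, texts in family_texts.items():
--         combined = "".join(texts)
--         codepoints = set(combined)
--         family_codepoints[family] = codepoints
--     return family_codepoints
-- ===== SOURCE B (Python) =====
-- def build_family_codepoints(class_to_family, class_texts):
--     pairs = [(class_to_family.get(cls), text) for cls, text in class_texts.items()]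
--     families = []
--     for fam, _ in pairs:
--         if fam and fam not in families:
--             families.append(fam)
--     return {fam: {ch for f, text in pairs if f == fam for ch in text}
--             for fam in families}
-- ===== Notes on version B (the rewrite author's own statement) =====
-- stated objective: alternative
-- what changed: Instead of A's single grouping pass into a family->texts dict followed by a join/set pass, B precomputes (family, text) pairs, collects the distinct truthy families in first-appearance order, and then builds each family's codepoint set by a per-family scan over the pairs (a comprehension), using no intermediate dict at all.
import Mathlib
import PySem

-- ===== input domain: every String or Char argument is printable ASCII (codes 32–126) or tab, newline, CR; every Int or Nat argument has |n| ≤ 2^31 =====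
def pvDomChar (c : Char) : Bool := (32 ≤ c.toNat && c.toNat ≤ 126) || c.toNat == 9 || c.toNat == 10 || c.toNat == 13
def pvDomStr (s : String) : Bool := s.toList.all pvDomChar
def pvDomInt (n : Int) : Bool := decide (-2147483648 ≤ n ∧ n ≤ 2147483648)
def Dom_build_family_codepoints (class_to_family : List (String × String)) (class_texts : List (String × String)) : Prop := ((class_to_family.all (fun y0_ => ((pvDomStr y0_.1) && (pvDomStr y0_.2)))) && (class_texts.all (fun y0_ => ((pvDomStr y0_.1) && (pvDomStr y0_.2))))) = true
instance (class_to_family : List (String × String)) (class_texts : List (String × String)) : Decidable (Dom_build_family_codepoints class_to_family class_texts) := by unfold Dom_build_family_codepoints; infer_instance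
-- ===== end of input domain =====

-- B drops A's intermediate family->texts dict entirely: it lists the distinct truthy families in
-- first-appearance order and builds each family's codepoint set by a per-family scan over the
-- (family, text) pairs (objective: alternative — a nested-scan formulation of the same grouping).


-- iterating a Python string yields its characters as 1-character strings
def pvChr (c : Char) : String := String.ofList [c]

-- ===== PORT A =====
def build_family_codepoints (class_to_family : List (String × String)) (class_texts : List (String × String)) : List (String × List String) :=
  let ctf : PySem.Dict String String := PySem.Dict.ofList class_to_family
  -- for cls, text in class_texts.items(): family = class_to_family.get(cls); if not family: continue; family_texts.setdefault(family, []).append(text)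
  let family_texts : PySem.Dict String (List String) :=
    class_texts.foldl (fun d p =>
      match ctf.get? p.1 with
      | none => d
      | some family => if family = "" then d else d.modify family [] (· ++ [p.2]))
      PySem.Dict.empty
  -- for family, texts in family_texts.items(): family_codepoints[family] = set("".join(texts))
  let family_codepoints : PySem.Dict String (PySem.Set String) :=
    family_texts.items.foldl (fun d q =>
      d.insert q.1 (PySem.Set.ofList ((PySem.Str.join "" q.2).toList.map pvChr)))
      PySem.Dict.empty
  family_codepoints.items

-- ===== PORT B =====
def build_family_codepoints_alt (class_to_family : List (String × String)) (class_texts : List (String × String)) : List (String × List String) :=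
  let ctfD : PySem.Dict String String := PySem.Dict.ofList class_to_family
  -- pairs = [(class_to_family.get(cls), text) for cls, text in class_texts.items()]
  let pairs : List (Option String × String) := class_texts.map (fun p => (ctfD.get? p.1, p.2))
  -- families: distinct truthy families in first-appearance order
  let families : List String :=
    pairs.foldl (fun fs q =>
      match q.1 with
      | none => fs
      | some f => if f ≠ "" ∧ f ∉ fs then fs ++ [f] else fs) []
  -- {fam: {ch for f, text in pairs if f == fam for ch in text} for fam in families}
  families.map (fun fam =>
    (fam, PySem.Set.ofList
      ((pairs.foldl (fun acc q => if q.1 = some fam then acc ++ q.2.toList else acc) []).map pvChr)))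

-- ===== PRECONDITION & SPEC =====
def Spec_build_family_codepoints (class_to_family : List (String × String)) (class_texts : List (String × String)) (out : List (String × List String)) : Prop := out = build_family_codepoints_alt class_to_family class_texts
instance (class_to_family : List (String × String)) (class_texts : List (String × String)) (out : List (String × List String)) : Decidable (Spec_build_family_codepoints class_to_family class_texts out) := by unfold Spec_build_family_codepoints; infer_instance

-- ===== CLAIM (what is proved, stated in full; the proofs are below) =====
def Claim_equal_build_family_codepoints : Prop := ∀ (class_to_family : List (String × String)) (class_texts : List (String × String)), Dom_build_family_codepoints class_to_family class_texts → Spec_build_family_codepoints class_to_family class_texts (build_family_codepoints class_to_family class_texts)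

-- ===== LEMMAS AND PROOFS =====

-- the codepoint set of a list of texts (value-level abstraction of both programs)
def pvCP (texts : List String) : PySem.Set String :=
  PySem.Set.ofList (((texts.map String.toList).flatten).map pvChr)

-- A's first loop, abstracted over the lookup dict
def pvLoopA (ctf : PySem.Dict String String) (l : List (String × String))
    (d : PySem.Dict String (List String)) : PySem.Dict String (List String) :=
  l.foldl (fun d p =>
    match ctf.get? p.1 with
    | none => d
    | some family => if family = "" then d else d.modify family [] (· ++ [p.2])) d

-- the texts of family f, in class_texts order
def pvCollect (ctf : PySem.Dict String String) (l : List (String × String)) (f : String) : List String :=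
  ((l.filter (fun p => ctf.get? p.1 = some f)).map (·.2))

lemma pv_join_toList (texts : List String) :
    (PySem.Str.join "" texts).toList = (texts.map String.toList).flatten := by
  simp only [PySem.Str.join, PySem.Chars.join, List.intercalate, String.toList_ofList,
    String.toList_empty]
  induction texts.map String.toList with
  | nil => rfl
  | cons a t ih =>
    cases t with
    | nil => rfl
    | cons b u => simpa using ih

lemma pv_nodup_keys (ctf : PySem.Dict String String) (l : List (String × String))
    (d : PySem.Dict String (List String)) (h : d.keys.Nodup) : (pvLoopA ctf l d).keys.Nodup := by
  induction l generalizing d with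
  | nil => exact h
  | cons p l ih =>
    simp only [pvLoopA, List.foldl_cons]
    cases hg : ctf.get? p.1 with
    | none => exact ih d h
    | some family =>
      by_cases hf : family = ""
      · simp only [hf, if_true]; exact ih d h
      · simp only [if_neg hf]
        exact ih _ (PySem.Dict.nodup_keys_insert _ _ _ h)

-- keys of A's first loop = B's family list (first-appearance dedup of truthy families)
lemma pv_keys_loopA (ctf : PySem.Dict String String) (l : List (String × String))
    (d : PySem.Dict String (List String)) (hnd : d.keys.Nodup) :
    (pvLoopA ctf l d).keys
      = l.foldl (fun fs p =>
          match ctf.get? p.1 with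
          | none => fs
          | some f => if f ≠ "" ∧ f ∉ fs then fs ++ [f] else fs) d.keys := by
  induction l generalizing d with
  | nil => rfl
  | cons p l ih =>
    simp only [pvLoopA, List.foldl_cons] at *
    cases hg : ctf.get? p.1 with
    | none => exact ih d hnd
    | some f =>
      by_cases hf : f = ""
      · simp only [if_pos hf, ih d hnd]
        simp [hf]
      · simp only [if_neg hf]
        by_cases hm : f ∈ d.keys
        · have hc : (d.modify f [] (· ++ [p.2])).keys = d.keys := by
            rw [PySem.Dict.keys_modify, PySem.Dict.keys_insert_of_contains]
            rw [PySem.Dict.contains_eq_decide_mem_keys]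
            simpa using hm
          rw [ih _ (by rw [hc]; exact hnd), hc]
          simp [hf, hm]
        · have hc : (d.modify f [] (· ++ [p.2])).keys = d.keys ++ [f] := by
            rw [PySem.Dict.keys_modify, PySem.Dict.keys_insert_of_not_contains]
            rw [PySem.Dict.contains_eq_decide_mem_keys]
            simpa using hm
          have hnd2 : (d.keys ++ [f]).Nodup := by
            simp [List.nodup_append, hnd]
            intro a ha hb
            exact hm (hb ▸ ha)
          rw [ih _ (by rw [hc]; exact hnd2), hc]
          simp [hf, hm]

-- a family appearing in B's fold accumulator is nonempty
lemma pv_families_ne (ctf : PySem.Dict String String) (l : List (String × String))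
    (fs : List String) (h : ∀ f ∈ fs, f ≠ "") :
    ∀ f ∈ l.foldl (fun fs p =>
        match ctf.get? p.1 with
        | none => fs
        | some f => if f ≠ "" ∧ f ∉ fs then fs ++ [f] else fs) fs, f ≠ "" := by
  induction l generalizing fs with
  | nil => exact h
  | cons p l ih =>
    simp only [List.foldl_cons]
    cases hg : ctf.get? p.1 with
    | none => exact ih fs h
    | some g =>
      by_cases hgs : g ≠ "" ∧ g ∉ fs
      · simp only [if_pos hgs]
        refine ih _ ?_
        intro f hf
        rcases List.mem_append.mp hf with h1 | h1
        · exact h f h1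
        · exact (List.mem_singleton.mp h1) ▸ hgs.1
      · simp only [if_neg hgs]
        exact ih fs h

-- the value stored for a nonempty family f after A's first loop
lemma pv_getD_loopA (ctf : PySem.Dict String String) (l : List (String × String))
    (d : PySem.Dict String (List String)) (f : String) (hf : f ≠ "") :
    (pvLoopA ctf l d).getD f [] = d.getD f [] ++ pvCollect ctf l f := by
  induction l generalizing d with
  | nil => simp [pvLoopA, pvCollect]
  | cons p l ih =>
    simp only [pvLoopA, List.foldl_cons] at *
    cases hg : ctf.get? p.1 with
    | none => simp [pvCollect, hg, ih d]
    | some g =>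
      by_cases hge : g = ""
      · subst hge
        simp only [reduceIte]
        rw [ih d]
        simp [pvCollect, hg, Ne.symm hf]
      · simp only [if_neg hge]
        rw [ih]
        rw [PySem.Dict.getD_modify]
        by_cases hfg : f = g
        · subst hfg
          simp [pvCollect, hg]
        · simp [pvCollect, hg, hfg, Ne.symm hfg]

-- B's inner character fold = the characters of the collected texts, in order
lemma pv_char_fold (ctf : PySem.Dict String String) (l : List (String × String)) (f : String)
    (acc : List Char) :
    ((l.map (fun p => (ctf.get? p.1, p.2))).foldl
        (fun acc q => if q.1 = some f then acc ++ q.2.toList else acc) acc)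
      = acc ++ ((pvCollect ctf l f).map String.toList).flatten := by
  induction l generalizing acc with
  | nil => simp [pvCollect]
  | cons p l ih =>
    simp only [List.map_cons, List.foldl_cons]
    by_cases hp : ctf.get? p.1 = some f
    · simp [hp, ih, pvCollect]
    · simp [hp, ih, pvCollect]

-- A's second loop renders the grouped dict's items through pvCP
lemma pv_second_loop (l : List (String × List String)) (hl : (l.map Prod.fst).Nodup) :
    (l.foldl (fun (d : PySem.Dict String (PySem.Set String)) q =>
        d.insert q.1 (PySem.Set.ofList ((PySem.Str.join "" q.2).toList.map pvChr)))
      PySem.Dict.empty).items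
    = l.map (fun q => (q.1, pvCP q.2)) := by
  have := PySem.Dict.items_foldl_insert_fresh l Prod.fst
      (fun q => PySem.Set.ofList ((PySem.Str.join "" q.2).toList.map pvChr))
      PySem.Dict.empty (fun a _ => by simp [PySem.Dict.contains, PySem.Dict.empty]) hl
  rw [this]
  simp only [PySem.Dict.empty, List.nil_append]
  apply List.map_congr_left
  intro q _
  rw [pv_join_toList]
  rfl

-- ===== VERDICT (by name: the statement is the Claim_ definition above) =====
theorem build_family_codepoints_spec : Claim_equal_build_family_codepoints := by
  intro class_to_family class_texts _
  show (((class_texts.foldl (fun (d : PySem.Dict String (List String)) p =>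
      match (PySem.Dict.ofList class_to_family).get? p.1 with
      | none => d
      | some family => if family = "" then d else d.modify family [] (· ++ [p.2]))
      PySem.Dict.empty).items.foldl (fun (d : PySem.Dict String (PySem.Set String)) q =>
        d.insert q.1 (PySem.Set.ofList ((PySem.Str.join "" q.2).toList.map pvChr)))
      PySem.Dict.empty).items)
    = ((class_texts.map (fun p => ((PySem.Dict.ofList class_to_family).get? p.1, p.2))).foldl
        (fun fs q =>
          match q.1 with
          | none => fs
          | some f => if f ≠ "" ∧ f ∉ fs then fs ++ [f] else fs) []).map (fun fam =>
      (fam, PySem.Set.ofList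
        (((class_texts.map (fun p => ((PySem.Dict.ofList class_to_family).get? p.1, p.2))).foldl
            (fun acc q => if q.1 = some fam then acc ++ q.2.toList else acc) []).map pvChr)))
  have hnodup : (pvLoopA (PySem.Dict.ofList class_to_family) class_texts PySem.Dict.empty).keys.Nodup :=
    pv_nodup_keys _ class_texts PySem.Dict.empty PySem.Dict.nodup_keys_empty
  rw [show (class_texts.foldl (fun (d : PySem.Dict String (List String)) p =>
      match (PySem.Dict.ofList class_to_family).get? p.1 with
      | none => d
      | some family => if family = "" then d else d.modify family [] (· ++ [p.2]))
      PySem.Dict.empty) = pvLoopA (PySem.Dict.ofList class_to_family) class_texts PySem.Dict.empty from rfl]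
  rw [pv_second_loop _ hnodup]
  rw [PySem.Dict.items_eq_map_keys _ hnodup []]
  have hkeys : (pvLoopA (PySem.Dict.ofList class_to_family) class_texts PySem.Dict.empty).keys
      = (class_texts.map (fun p => ((PySem.Dict.ofList class_to_family).get? p.1, p.2))).foldl
          (fun fs q =>
            match q.1 with
            | none => fs
            | some f => if f ≠ "" ∧ f ∉ fs then fs ++ [f] else fs) [] := by
    rw [pv_keys_loopA _ class_texts PySem.Dict.empty PySem.Dict.nodup_keys_empty]
    rw [List.foldl_map]
    rfl
  rw [hkeys]
  rw [List.map_map]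
  apply List.map_congr_left
  intro f hf
  have hfne : f ≠ "" := by
    refine pv_families_ne (PySem.Dict.ofList class_to_family) class_texts [] (by simp) f ?_
    rw [List.foldl_map] at hf
    exact hf
  have hv : (pvLoopA (PySem.Dict.ofList class_to_family) class_texts PySem.Dict.empty).getD f []
      = pvCollect (PySem.Dict.ofList class_to_family) class_texts f := by
    rw [pv_getD_loopA _ class_texts PySem.Dict.empty f hfne]
    rfl
  simp only [Function.comp_apply, hv]
  rw [pv_char_fold _ class_texts f []]
  rfl
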